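-- pv_equiv track=rewrite | github.com/mochilang/mochi | tests/rosetta/transpiler/Python/cramers-rule.py | replaceCol
-- ===== SOURCE A (Python) =====
-- def replaceCol(m, col, v):
--     res = []
--     r = 0
--     while r < len(m):
--         row = []
--         c = 0
--         while c < len(m[r]):
--             if c == col:
--                 row = row + [v[r]]
--             else:
--                 row = row + [m[r][c]]
--             c = c + 1
--         res = res + [row]
--         r = r + 1
--     return res
-- ===== SOURCE B (Python) =====
-- def replaceCol(m, col, v):
--     res = []
--     for r, orig in enumerate(m):
--         row = list(orig)
--         if 0 <= col < len(row):
--             row[col] = v[r]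
--         res.append(row)
--     return res
-- ===== Notes on version B (the rewrite author's own statement) =====
-- stated objective: faster
-- what changed: Replaces the inner per-column while loop (which rebuilds each row element-by-element via quadratic `row + [x]` concatenation and a c == col branch) by a whole-row copy plus a single bounds-guarded indexed assignment row[col] = v[r].
import Mathlib
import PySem

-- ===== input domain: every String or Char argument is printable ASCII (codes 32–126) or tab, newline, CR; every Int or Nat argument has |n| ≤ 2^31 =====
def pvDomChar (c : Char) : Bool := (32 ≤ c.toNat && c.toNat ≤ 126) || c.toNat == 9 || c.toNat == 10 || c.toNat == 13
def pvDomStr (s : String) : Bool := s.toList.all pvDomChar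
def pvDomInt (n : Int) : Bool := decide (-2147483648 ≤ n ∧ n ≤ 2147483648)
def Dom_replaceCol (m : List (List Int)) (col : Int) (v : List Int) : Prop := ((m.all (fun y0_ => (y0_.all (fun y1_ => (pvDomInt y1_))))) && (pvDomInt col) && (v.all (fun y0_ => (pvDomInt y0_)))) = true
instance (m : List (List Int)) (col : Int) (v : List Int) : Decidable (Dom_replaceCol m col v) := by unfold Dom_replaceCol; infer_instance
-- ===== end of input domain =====

-- B replaces A's inner per-column loop (with its c == col branch) by a whole-row copy
-- plus one bounds-guarded indexed assignment; objective: simpler.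

-- ===== PORT A =====
-- inner while loop: c from 0 while c < len(m[r]); v[r] is passed in as vr (already fetched lazily via getD, only meaningful inside Pre_)
def pvRowLoop (mr : List Int) (vr col : Int) (c : Nat) (row : List Int) : List Int :=
  if c < mr.length then
    pvRowLoop mr vr col (c + 1)
      (row ++ [if (c : Int) = col then vr else mr.getD c 0])
  else row
termination_by mr.length - c

-- outer while loop: r from 0 while r < len(m)
def pvOutLoop (m : List (List Int)) (col : Int) (v : List Int) (r : Nat) (res : List (List Int)) : List (List Int) :=
  if r < m.length then
    pvOutLoop m col v (r + 1)
      (res ++ [pvRowLoop (m.getD r []) ((PySem.List.pyGet? v (r : Int)).getD 0) col 0 []])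
  else res
termination_by m.length - r

def replaceCol (m : List (List Int)) (col : Int) (v : List Int) : List (List Int) :=
  pvOutLoop m col v 0 []

-- ===== PORT B =====
def replaceCol_alt (m : List (List Int)) (col : Int) (v : List Int) : List (List Int) :=
  (PySem.List.enumerate m).map (fun p =>
    let row := p.2
    if 0 ≤ col ∧ col < (row.length : Int) then
      row.set col.toNat ((PySem.List.pyGet? v p.1).getD 0)
    else row)

-- ===== PRECONDITION & SPEC =====
-- Pre_ excludes exactly the inputs where Python A raises IndexError: v[r] is evaluated
-- only when 0 <= col < len(m[r]), and then r must index into v.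
def Pre_replaceCol (m : List (List Int)) (col : Int) (v : List Int) : Prop :=
  ∀ r : Nat, r < m.length → (0 ≤ col ∧ col < ((m.getD r []).length : Int)) → r < v.length
instance (m : List (List Int)) (col : Int) (v : List Int) : Decidable (Pre_replaceCol m col v) := by
  unfold Pre_replaceCol; infer_instance

def pvWitness_replaceCol : List (List Int) × Int × List Int := ([[1, 2], [3, 4]], 1, [9, 8])

def Spec_replaceCol (m : List (List Int)) (col : Int) (v : List Int) (out : List (List Int)) : Prop := out = replaceCol_alt m col v
instance (m : List (List Int)) (col : Int) (v : List Int) (out : List (List Int)) : Decidable (Spec_replaceCol m col v out) := by unfold Spec_replaceCol; infer_instance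

-- ===== CLAIM (what is proved, stated in full; the proofs are below) =====
def Claim_equal_replaceCol : Prop := ∀ (m : List (List Int)) (col : Int) (v : List Int), Dom_replaceCol m col v → Pre_replaceCol m col v → Spec_replaceCol m col v (replaceCol m col v)

-- ===== LEMMAS AND PROOFS =====

-- A's inner loop builds the suffix of the row from index c on, with the substituted column set
lemma pvRowLoop_eq (mr : List Int) (vr col : Int) :
    ∀ c row, pvRowLoop mr vr col c row =
      row ++ (if (c : Int) ≤ col ∧ col < (mr.length : Int)
              then (mr.drop c).set (col - c).toNat vr
              else mr.drop c) := by
  intro c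
  induction' hn : mr.length - c using Nat.strong_induction_on with n ih generalizing c
  intro row
  rw [pvRowLoop]
  by_cases hc : c < mr.length
  · simp only [hc, if_true]
    have hdrop : mr.drop c = mr.getD c 0 :: mr.drop (c + 1) := by
      rw [List.getD_eq_getElem _ _ hc, List.drop_eq_getElem_cons hc]
    rw [ih (mr.length - (c + 1)) (by omega) (c + 1) rfl]
    by_cases hcol : (c : Int) = col
    · have h1 : ((c : Int) ≤ col ∧ col < (mr.length : Int)) := by
        constructor <;> omega
      have h2 : ¬ (((c : Nat) + 1 : Int) ≤ col ∧ col < (mr.length : Int)) := by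
        omega
      rw [if_pos hcol, if_pos h1, if_neg (by push_cast at h2 ⊢; exact h2)]
      have h0 : (col - (c : Int)).toNat = 0 := by omega
      rw [hdrop, h0, List.set]
      simp
    · rw [if_neg hcol]
      by_cases h1 : ((c : Int) ≤ col ∧ col < (mr.length : Int))
      · have h2 : (((c : Nat) + 1 : Int) ≤ col ∧ col < (mr.length : Int)) := by
          omega
        rw [if_pos h1, if_pos (by push_cast at h2 ⊢; exact h2)]
        have hk : (col - (c : Int)).toNat = (col - ((c : Nat) + 1 : Int)).toNat + 1 := by
          push_cast at h2; omega
        rw [hdrop, hk]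
        push_cast
        simp [List.set]
      · have h2 : ¬ (((c : Nat) + 1 : Int) ≤ col ∧ col < (mr.length : Int)) := by
          push_cast at h1 ⊢; omega
        rw [if_neg h1, if_neg (by push_cast at h2 ⊢; exact h2), hdrop]
        simp
  · simp only [hc, if_false]
    have : ¬ ((c : Int) ≤ col ∧ col < (mr.length : Int)) ∨
           ((c : Int) ≤ col ∧ col < (mr.length : Int)) := (em _).symm
    have hd : mr.drop c = [] := List.drop_eq_nil_of_le (by omega)
    rcases this with h | h
    · rw [if_neg h, hd]; simp
    · exfalso; omega

-- A's inner loop from 0 computes exactly B's per-row value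
lemma pvRowLoop_zero (mr : List Int) (vr col : Int) :
    pvRowLoop mr vr col 0 [] =
      if 0 ≤ col ∧ col < (mr.length : Int) then mr.set col.toNat vr else mr := by
  rw [pvRowLoop_eq]
  simp

-- A's outer loop from r appends B's map over the remaining enumerated rows
lemma pvOutLoop_eq (m : List (List Int)) (col : Int) (v : List Int) :
    ∀ r res, pvOutLoop m col v r res =
      res ++ ((PySem.List.enumerate m).drop r).map (fun p =>
        if 0 ≤ col ∧ col < ((p.2).length : Int) then
          (p.2).set col.toNat ((PySem.List.pyGet? v p.1).getD 0)
        else p.2) := by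
  intro r
  induction' hn : m.length - r using Nat.strong_induction_on with n ih generalizing r
  intro res
  rw [pvOutLoop]
  by_cases hr : r < m.length
  · simp only [hr, if_true]
    have hlen : r < (PySem.List.enumerate m).length := by
      rw [PySem.List.length_enumerate]; exact hr
    have hdrop : (PySem.List.enumerate m).drop r =
        (PySem.List.enumerate m)[r] :: (PySem.List.enumerate m).drop (r + 1) :=
      List.drop_eq_getElem_cons hlen
    rw [ih (m.length - (r + 1)) (by omega) (r + 1) rfl, hdrop]
    rw [PySem.List.getElem_enumerate]
    simp only [List.map_cons, zero_add]
    rw [pvRowLoop_zero, List.getD_eq_getElem _ _ hr]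
    simp
  · simp only [hr, if_false]
    have : (PySem.List.enumerate m).drop r = [] := by
      apply List.drop_eq_nil_of_le
      rw [PySem.List.length_enumerate]; omega
    rw [this]; simp

-- ===== VERDICT (by name: the statement is the Claim_ definition above) =====
theorem replaceCol_spec : Claim_equal_replaceCol := by
  intro m col v _ _
  unfold Spec_replaceCol replaceCol replaceCol_alt
  rw [pvOutLoop_eq]
  simp
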